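-- pv_equiv track=rewrite | github.com/denisefavila/training | interview/interview/binary_search/stores_and_houses.py | get_closest_stores
-- ===== SOURCE A (Python) =====
-- from typing import List
--
-- def find_closest(value: int, nums: List[int]):
--     """
--     [1,2,5] ->
--
--     """
--     # find first greater or equal than
--     left, right = 0, len(nums) - 1
--
--     while left <= right:
--         mid = (left + right) // 2
--         if nums[mid] < value:
--             left = mid + 1
--         else:
--             right = mid - 1
--
--     if left == 0:
--         return nums[0]
--     if left == len(nums):
--         return nums[-1]
--
--     left_store = nums[left - 1]
--     right_store = nums[left]
--
--     if abs(left_store - value) <= abs(right_store - value):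
--         return left_store
--     else:
--         return right_store
--
-- def get_closest_stores(houses: List[int], stores: List[int]):
--     """
--     You are given 2 arrays representing integer locations of stores and houses
--     (each location in this problem is one-dimensional). For each house, find the store closest to it.
--     Return an integer array result where result[i] should denote the location of the store closest
--     to the i-th house. If many stores are equidistant from a particular house,
--     choose the store with the smallest numerical location. Note that there may
--     be multiple stores and houses at the same location.
--
--     Input: houses = [5, 10, 17], stores = [1, 5, 20, 11, 16]
--     Output: [5, 11, 16]
--
--     Input: houses = [2, 4, 2], stores = [5, 1, 2, 3]
--     Output: [2, 3, 2]
--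
--     Input: houses = [4, 8, 1, 1], stores = [5, 3, 1, 2, 6]
--     Output: [3, 6, 1, 1]
--     """
--
--     if not stores:
--         return []
--
--     result = []
--
--     stores.sort()
--     for house in houses:
--         current_store = find_closest(house, stores)
--         result.append(current_store)
--     return result
-- ===== SOURCE B (Python) =====
-- from typing import List
--
-- def get_closest_stores(houses: List[int], stores: List[int]):
--     # Per-house linear scan for the store minimizing (distance, location); no sorting, no binary search.
--     # Note: unlike the original, this does not sort `stores` in place (return value is identical).
--     if not stores:
--         return []
--     return [_closest(house, stores) for house in houses]
--
-- def _closest(house: int, stores: List[int]) -> int: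
--     best = stores[0]
--     for s in stores[1:]:
--         if abs(s - house) < abs(best - house) or (abs(s - house) == abs(best - house) and s < best):
--             best = s
--     return best
-- ===== Notes on version B (the rewrite author's own statement) =====
-- stated objective: simpler
-- what changed: Replaces sort-then-binary-search with a direct per-house linear scan that keeps the store minimizing (distance, location); B does not sort stores in place (return value is identical).
import Mathlib
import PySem

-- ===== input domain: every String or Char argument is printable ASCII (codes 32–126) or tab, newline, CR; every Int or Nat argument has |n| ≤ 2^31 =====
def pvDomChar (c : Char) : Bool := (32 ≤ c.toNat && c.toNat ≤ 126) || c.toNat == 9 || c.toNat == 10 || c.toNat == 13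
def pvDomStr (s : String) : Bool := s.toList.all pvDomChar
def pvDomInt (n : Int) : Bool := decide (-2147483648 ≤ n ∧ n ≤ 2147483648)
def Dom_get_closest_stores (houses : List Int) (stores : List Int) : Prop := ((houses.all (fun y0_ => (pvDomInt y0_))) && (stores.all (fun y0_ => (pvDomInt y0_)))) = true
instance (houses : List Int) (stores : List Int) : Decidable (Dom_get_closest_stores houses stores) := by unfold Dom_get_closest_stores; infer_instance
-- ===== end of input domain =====

-- B replaces sort + per-house binary search by a per-house linear minimum scan (simpler); A sorts
-- `stores` in place, B does not — the equivalence proved here is about the return value only.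

-- ===== PORT A =====
-- the `while left <= right` binary-search loop of find_closest; indices are always in range
-- (0 ≤ left ≤ mid ≤ right < len nums when the branch is taken), so pyGetD is exact here
def findClosestLoop (value : Int) (nums : List Int) (left right : Int) : Int :=
  if h : left ≤ right then
    let mid := PySem.Int.floordiv (left + right) 2
    if PySem.List.pyGetD nums mid 0 < value then
      findClosestLoop value nums (mid + 1) right
    else
      findClosestLoop value nums left (mid - 1)
  else
    left
termination_by (right + 1 - left).toNat
decreasing_by
  · have := PySem.Int.floordiv_two_mid_bounds h
    omega
  · have := PySem.Int.floordiv_two_mid_bounds h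
    omega

def find_closest (value : Int) (nums : List Int) : Int :=
  let left := findClosestLoop value nums 0 (PySem.List.len nums - 1)
  if left = 0 then PySem.List.pyGetD nums 0 0
  else if left = PySem.List.len nums then PySem.List.pyGetD nums (-1) 0
  else
    let left_store := PySem.List.pyGetD nums (left - 1) 0
    let right_store := PySem.List.pyGetD nums left 0
    if |left_store - value| ≤ |right_store - value| then left_store else right_store

def get_closest_stores (houses : List Int) (stores : List Int) : List Int :=
  if stores = [] then []
  else
    let sorted_stores := PySem.List.sorted stores (fun x => x) false
    houses.foldl (fun result house => result ++ [find_closest house sorted_stores]) []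

-- ===== PORT B =====
-- one step of _closest's scan: keep `s` iff it is strictly better in (distance, location) order
def pyMinStep (house best s : Int) : Int :=
  if |s - house| < |best - house| ∨ (|s - house| = |best - house| ∧ s < best) then s else best

def get_closest_stores_alt (houses : List Int) (stores : List Int) : List Int :=
  match stores with
  | [] => []
  | s0 :: rest => houses.map (fun house => rest.foldl (pyMinStep house) s0)

-- ===== PRECONDITION & SPEC =====
def Spec_get_closest_stores (houses : List Int) (stores : List Int) (out : List Int) : Prop := out = get_closest_stores_alt houses stores
instance (houses : List Int) (stores : List Int) (out : List Int) : Decidable (Spec_get_closest_stores houses stores out) := by unfold Spec_get_closest_stores; infer_instance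

-- ===== CLAIM (what is proved, stated in full; the proofs are below) =====
def Claim_equal_get_closest_stores : Prop := ∀ (houses : List Int) (stores : List Int), Dom_get_closest_stores houses stores → Spec_get_closest_stores houses stores (get_closest_stores houses stores)

-- ===== LEMMAS AND PROOFS =====

-- "x is the store returned for house h from l": minimal in the lexicographic (|·-h|, ·) order
def keyLE (h x y : Int) : Prop := |x - h| < |y - h| ∨ (|x - h| = |y - h| ∧ x ≤ y)

def IsBest (h : Int) (l : List Int) (x : Int) : Prop := x ∈ l ∧ ∀ y ∈ l, keyLE h x y

lemma keyLE_trans (h x y z : Int) (h1 : keyLE h x y) (h2 : keyLE h y z) : keyLE h x z := by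
  unfold keyLE at *; omega

lemma isBest_unique (h : Int) (l : List Int) (x y : Int)
    (hx : IsBest h l x) (hy : IsBest h l y) : x = y := by
  have h1 := hx.2 y hy.1
  have h2 := hy.2 x hx.1
  unfold keyLE at h1 h2; omega

lemma foldl_isBest (h s0 : Int) (rest : List Int) :
    IsBest h (s0 :: rest) (rest.foldl (pyMinStep h) s0) := by
  induction rest generalizing s0 with
  | nil =>
      refine ⟨List.mem_singleton.mpr rfl, ?_⟩
      intro y hy
      rw [List.mem_singleton] at hy
      subst hy
      exact Or.inr ⟨rfl, le_refl _⟩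
  | cons s rest ih =>
      have step_le_s0 : keyLE h (pyMinStep h s0 s) s0 := by
        unfold pyMinStep keyLE; split <;> omega
      have step_le_s : keyLE h (pyMinStep h s0 s) s := by
        unfold pyMinStep keyLE; split <;> omega
      have step_mem : pyMinStep h s0 s = s0 ∨ pyMinStep h s0 s = s := by
        unfold pyMinStep; split <;> simp
      obtain ⟨hm, hall⟩ := ih (pyMinStep h s0 s)
      rw [List.foldl_cons]
      have hle_step : keyLE h ((rest).foldl (pyMinStep h) (pyMinStep h s0 s)) (pyMinStep h s0 s) :=
        hall _ (List.mem_cons_self ..)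
      refine ⟨?_, ?_⟩
      · rcases List.mem_cons.mp hm with hm | hm
        · rw [hm]
          rcases step_mem with he | he <;> rw [he] <;> simp
        · exact List.mem_cons.mpr (Or.inr (List.mem_cons.mpr (Or.inr hm)))
      · intro y hy
        rcases List.mem_cons.mp hy with rfl | hy
        · exact keyLE_trans _ _ _ _ hle_step step_le_s0
        rcases List.mem_cons.mp hy with rfl | hy
        · exact keyLE_trans _ _ _ _ hle_step step_le_s
        · exact hall y (List.mem_cons.mpr (Or.inr hy))

-- on a ≤-sorted list, getElem is monotone
lemma sorted_getElem_mono (l : List Int) (hp : l.Pairwise (· ≤ ·)) (i j : Nat)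
    (hij : i ≤ j) (hj : j < l.length) : l[i]'(by omega) ≤ l[j] := by
  rcases Nat.lt_or_ge i j with hlt | hge
  · exact List.pairwise_iff_getElem.mp hp i j (by omega) hj hlt
  · have : i = j := by omega
    subst this; exact le_refl _

-- one-step unfolding equations for findClosestLoop (its body binds mid with a let)
lemma loop_step_lt (value : Int) (nums : List Int) (left right : Int) (h : left ≤ right)
    (hlt : PySem.List.pyGetD nums (PySem.Int.floordiv (left + right) 2) 0 < value) :
    findClosestLoop value nums left right =
      findClosestLoop value nums (PySem.Int.floordiv (left + right) 2 + 1) right := by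
  rw [findClosestLoop, dif_pos h]; exact if_pos hlt

lemma loop_step_ge (value : Int) (nums : List Int) (left right : Int) (h : left ≤ right)
    (hlt : ¬ PySem.List.pyGetD nums (PySem.Int.floordiv (left + right) 2) 0 < value) :
    findClosestLoop value nums left right =
      findClosestLoop value nums left (PySem.Int.floordiv (left + right) 2 - 1) := by
  rw [findClosestLoop, dif_pos h]; exact if_neg hlt

lemma loop_exit (value : Int) (nums : List Int) (left right : Int) (h : ¬ left ≤ right) :
    findClosestLoop value nums left right = left := by
  rw [findClosestLoop]; exact dif_neg h

-- characterization of the binary-search loop: it returns the lower-bound index of `value`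
lemma loop_spec (value : Int) (nums : List Int) (hp : nums.Pairwise (· ≤ ·)) (l r : Int) :
    0 ≤ l → l ≤ r + 1 → r < (nums.length : Int) →
    (∀ (i : Nat) (_ : i < nums.length), (i : Int) < l → nums[i] < value) →
    (∀ (i : Nat) (_ : i < nums.length), r < (i : Int) → value ≤ nums[i]) →
    0 ≤ findClosestLoop value nums l r ∧ findClosestLoop value nums l r ≤ (nums.length : Int) ∧
    (∀ (i : Nat) (_ : i < nums.length), (i : Int) < findClosestLoop value nums l r → nums[i] < value) ∧
    (∀ (i : Nat) (_ : i < nums.length), findClosestLoop value nums l r ≤ (i : Int) → value ≤ nums[i]) := by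
  induction l, r using findClosestLoop.induct (value := value) (nums := nums) with
  | case1 l r hle mid hlt ih =>
      intro hl hlr hr hlow hhigh
      have hmiddef : mid = PySem.Int.floordiv (l + r) 2 := rfl
      have hmid := PySem.Int.floordiv_two_mid_bounds hle
      rw [← hmiddef] at hmid
      rw [loop_step_lt value nums l r hle (hmiddef ▸ hlt)]
      rw [← hmiddef]
      have hmidget : PySem.List.pyGetD nums mid 0 = nums[mid.toNat]'(by omega) :=
        PySem.List.pyGetD_eq_getElem (xs := nums) (i := mid) (d := 0) (by omega) (by omega)
      refine ih (by omega) (by omega) hr ?_ hhigh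
      intro i hi hilt
      have hmono : nums[i] ≤ nums[mid.toNat]'(by omega) :=
        sorted_getElem_mono nums hp i mid.toNat (by omega) (by omega)
      rw [hmidget] at hlt
      omega
  | case2 l r hle mid hlt ih =>
      intro hl hlr hr hlow hhigh
      have hmiddef : mid = PySem.Int.floordiv (l + r) 2 := rfl
      have hmid := PySem.Int.floordiv_two_mid_bounds hle
      rw [← hmiddef] at hmid
      rw [loop_step_ge value nums l r hle (hmiddef ▸ hlt)]
      rw [← hmiddef]
      have hmidget : PySem.List.pyGetD nums mid 0 = nums[mid.toNat]'(by omega) :=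
        PySem.List.pyGetD_eq_getElem (xs := nums) (i := mid) (d := 0) (by omega) (by omega)
      refine ih hl (by omega) (by omega) hlow ?_
      intro i hi hgt
      have hmono : nums[mid.toNat]'(by omega) ≤ nums[i] :=
        sorted_getElem_mono nums hp mid.toNat i (by omega) hi
      rw [hmidget] at hlt
      omega
  | case3 l r hle =>
      intro hl hlr hr hlow hhigh
      rw [loop_exit value nums l r hle]
      exact ⟨hl, by omega, fun i hi h1 => hlow i hi h1, fun i hi h1 => hhigh i hi (by omega)⟩

lemma find_closest_isBest (h : Int) (l : List Int) (hne : l ≠ []) (hp : l.Pairwise (· ≤ ·)) :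
    IsBest h l (find_closest h l) := by
  have hlen : 0 < l.length := List.length_pos_iff.mpr hne
  obtain ⟨hL0, hLlen, hlow, hhigh⟩ :=
    loop_spec h l hp 0 ((l.length : Int) - 1) (le_refl 0) (by omega) (by omega)
      (by intro i _ hi; omega) (by intro i hi hgt; omega)
  have hunf : find_closest h l =
      (if findClosestLoop h l 0 (PySem.List.len l - 1) = 0 then PySem.List.pyGetD l 0 0
       else if findClosestLoop h l 0 (PySem.List.len l - 1) = PySem.List.len l then
         PySem.List.pyGetD l (-1) 0
       else if |PySem.List.pyGetD l (findClosestLoop h l 0 (PySem.List.len l - 1) - 1) 0 - h| ≤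
           |PySem.List.pyGetD l (findClosestLoop h l 0 (PySem.List.len l - 1)) 0 - h| then
         PySem.List.pyGetD l (findClosestLoop h l 0 (PySem.List.len l - 1) - 1) 0
       else PySem.List.pyGetD l (findClosestLoop h l 0 (PySem.List.len l - 1)) 0) := rfl
  rw [hunf]
  simp only [PySem.List.len_eq]
  set L := findClosestLoop h l 0 ((l.length : Int) - 1) with hLdef
  by_cases hL : L = 0
  · rw [if_pos hL]
    have hget : PySem.List.pyGetD l 0 0 = l[0] := by
      have := PySem.List.pyGetD_eq_getElem (xs := l) (i := 0) (d := 0) (by omega) (by omega)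
      simpa using this
    rw [hget]
    refine ⟨List.getElem_mem _, ?_⟩
    intro y hy
    obtain ⟨j, hj, rfl⟩ := List.mem_iff_getElem.mp hy
    have h0y : l[0] ≤ l[j] := sorted_getElem_mono l hp 0 j (by omega) hj
    have hv0 : h ≤ l[0] := hhigh 0 (by omega) (by omega)
    have hvj : h ≤ l[j] := hhigh j hj (by omega)
    have ha : |l[0] - h| = l[0] - h := abs_of_nonneg (by omega)
    have hb : |l[j] - h| = l[j] - h := abs_of_nonneg (by omega)
    unfold keyLE; omega
  · rw [if_neg hL]
    by_cases hLl : L = (l.length : Int)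
    · rw [if_pos hLl]
      have hget : PySem.List.pyGetD l (-1) 0 = l[l.length - 1]'(by omega) := by
        have := PySem.List.pyGetD_neg_natCast (xs := l) (k := 1) (d := 0) (by omega) (by omega)
        simpa using this
      rw [hget]
      refine ⟨List.getElem_mem _, ?_⟩
      intro y hy
      obtain ⟨j, hj, rfl⟩ := List.mem_iff_getElem.mp hy
      have hjlast : l[j] ≤ l[l.length - 1]'(by omega) :=
        sorted_getElem_mono l hp j (l.length - 1) (by omega) (by omega)
      have hvlast : l[l.length - 1]'(by omega) < h := hlow (l.length - 1) (by omega) (by omega)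
      have hvj : l[j] < h := hlow j hj (by omega)
      have ha : |l[l.length - 1]'(by omega) - h| = -(l[l.length - 1]'(by omega) - h) :=
        abs_of_nonpos (by omega)
      have hb : |l[j] - h| = -(l[j] - h) := abs_of_nonpos (by omega)
      unfold keyLE; omega
    · rw [if_neg hLl]
      have hLpos : 0 < L := by omega
      have hLlt : L < (l.length : Int) := by omega
      have hgetl : PySem.List.pyGetD l (L - 1) 0 = l[(L - 1).toNat]'(by omega) :=
        PySem.List.pyGetD_eq_getElem (xs := l) (i := L - 1) (d := 0) (by omega) (by omega)
      have hgetr : PySem.List.pyGetD l L 0 = l[L.toNat]'(by omega) :=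
        PySem.List.pyGetD_eq_getElem (xs := l) (i := L) (d := 0) (by omega) (by omega)
      rw [hgetl, hgetr]
      have hls : l[(L - 1).toNat]'(by omega) < h := hlow (L - 1).toNat (by omega) (by omega)
      have hrs : h ≤ l[L.toNat]'(by omega) := hhigh L.toNat (by omega) (by omega)
      have hal : |l[(L - 1).toNat]'(by omega) - h| = -(l[(L - 1).toNat]'(by omega) - h) :=
        abs_of_nonpos (by omega)
      have har : |l[L.toNat]'(by omega) - h| = l[L.toNat]'(by omega) - h := abs_of_nonneg (by omega)
      by_cases hcmp : |l[(L - 1).toNat]'(by omega) - h| ≤ |l[L.toNat]'(by omega) - h|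
      · rw [if_pos hcmp]
        refine ⟨List.getElem_mem _, ?_⟩
        intro y hy
        obtain ⟨j, hj, rfl⟩ := List.mem_iff_getElem.mp hy
        rcases Nat.lt_or_ge j L.toNat with hjL | hjL
        · have hjle : l[j] ≤ l[(L - 1).toNat]'(by omega) :=
            sorted_getElem_mono l hp j (L - 1).toNat (by omega) (by omega)
          have hvj : l[j] < h := hlow j hj (by omega)
          have hb : |l[j] - h| = -(l[j] - h) := abs_of_nonpos (by omega)
          unfold keyLE; omega
        · have hjge : l[L.toNat]'(by omega) ≤ l[j] := sorted_getElem_mono l hp L.toNat j hjL hj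
          have hvj : h ≤ l[j] := hhigh j hj (by omega)
          have hb : |l[j] - h| = l[j] - h := abs_of_nonneg (by omega)
          unfold keyLE; omega
      · rw [if_neg hcmp]
        refine ⟨List.getElem_mem _, ?_⟩
        intro y hy
        obtain ⟨j, hj, rfl⟩ := List.mem_iff_getElem.mp hy
        rcases Nat.lt_or_ge j L.toNat with hjL | hjL
        · have hjle : l[j] ≤ l[(L - 1).toNat]'(by omega) :=
            sorted_getElem_mono l hp j (L - 1).toNat (by omega) (by omega)
          have hvj : l[j] < h := hlow j hj (by omega)
          have hb : |l[j] - h| = -(l[j] - h) := abs_of_nonpos (by omega)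
          unfold keyLE; omega
        · have hjge : l[L.toNat]'(by omega) ≤ l[j] := sorted_getElem_mono l hp L.toNat j hjL hj
          have hvj : h ≤ l[j] := hhigh j hj (by omega)
          have hb : |l[j] - h| = l[j] - h := abs_of_nonneg (by omega)
          unfold keyLE; omega

-- per house: A's binary search on the sorted list returns B's linear-scan minimum
lemma closest_eq (h s0 : Int) (rest : List Int) :
    find_closest h (PySem.List.sorted (s0 :: rest) (fun x => x) false) = rest.foldl (pyMinStep h) s0 := by
  set sl := PySem.List.sorted (s0 :: rest) (fun x => x) false with hsl
  have hperm : sl.Perm (s0 :: rest) := PySem.List.sorted_perm ..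
  have hp : sl.Pairwise (· ≤ ·) := PySem.List.sorted_pairwise ..
  have hne : sl ≠ [] := by
    intro hnil
    have := hperm.length_eq
    rw [hnil] at this
    simp at this
  have h1 : IsBest h sl (find_closest h sl) := find_closest_isBest h sl hne hp
  have h2 : IsBest h sl (rest.foldl (pyMinStep h) s0) := by
    obtain ⟨hm, hall⟩ := foldl_isBest h s0 rest
    exact ⟨hperm.mem_iff.mpr hm, fun y hy => hall y (hperm.mem_iff.mp hy)⟩
  exact isBest_unique h sl _ _ h1 h2

-- ===== VERDICT (by name: the statement is the Claim_ definition above) =====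
theorem get_closest_stores_spec : Claim_equal_get_closest_stores := by
  intro houses stores _
  unfold Spec_get_closest_stores get_closest_stores get_closest_stores_alt
  cases stores with
  | nil => simp
  | cons s0 rest =>
      rw [if_neg (by simp)]
      rw [PySem.List.foldl_append_singleton_eq_map]
      exact List.map_congr_left fun h _ => closest_eq h s0 rest
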